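-- pv_equiv track=rewrite | github.com/pypi-data/pypi-mirror-274 | packages/bbgws/bbgws-0.1.1.tar.gz/bbgws-0.1.1/src/bbgws/steps/_stagefilter.py | _get_pattern_types
-- ===== SOURCE A (Python) =====
-- from typing import List, Tuple
--
-- def _get_pattern_types(patterns: List[str]) -> Tuple[bool, bool]:
--     any_positive = False
--     any_negative = False
--     for pattern in patterns:
--         if pattern.startswith("!"):
--             any_negative = True
--         else:
--             any_positive = True
--         if any_positive and any_negative:
--             break
--
--     return any_positive, any_negative
-- ===== SOURCE B (Python) =====
-- from typing import List, Tuple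
--
-- def _get_pattern_types(patterns: List[str]) -> Tuple[bool, bool]:
--     # Count negative patterns once; both flags follow arithmetically.
--     neg = sum(1 for p in patterns if p.startswith("!"))
--     return (neg < len(patterns), neg > 0)
-- ===== Notes on version B (the rewrite author's own statement) =====
-- stated objective: alternative
-- what changed: Replaces the flag-maintaining loop with early break by a counting reduction: count the '!'-prefixed patterns once and derive both flags arithmetically (neg < len gives a positive pattern exists, neg > 0 gives a negative one).
import Mathlib
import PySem

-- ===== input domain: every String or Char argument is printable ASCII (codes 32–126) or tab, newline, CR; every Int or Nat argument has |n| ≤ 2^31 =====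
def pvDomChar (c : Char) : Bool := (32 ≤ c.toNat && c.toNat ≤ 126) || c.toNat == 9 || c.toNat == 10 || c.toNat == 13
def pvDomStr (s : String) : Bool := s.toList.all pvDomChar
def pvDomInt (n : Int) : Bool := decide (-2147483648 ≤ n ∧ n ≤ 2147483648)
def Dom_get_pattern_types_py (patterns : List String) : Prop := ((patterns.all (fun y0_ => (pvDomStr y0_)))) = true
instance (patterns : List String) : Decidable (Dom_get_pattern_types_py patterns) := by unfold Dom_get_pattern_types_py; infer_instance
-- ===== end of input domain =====

-- B replaces A's flag-maintaining loop (with early break) by a counting reduction: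
-- count the "!"-prefixed patterns once and derive both flags arithmetically (alternative decomposition, same cost).
-- ===== PORT A =====
-- loop with `break` when both flags are set; ported as structural recursion over the list
def getPatternTypesLoop (ps : List String) (anyPos anyNeg : Bool) : Bool × Bool :=
  match ps with
  | [] => (anyPos, anyNeg)
  | p :: rest =>
    let anyNeg' := if PySem.Str.startswith p "!" then true else anyNeg
    let anyPos' := if PySem.Str.startswith p "!" then anyPos else true
    if anyPos' && anyNeg' then (anyPos', anyNeg')
    else getPatternTypesLoop rest anyPos' anyNeg'

def get_pattern_types_py (patterns : List String) : Bool × Bool :=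
  getPatternTypesLoop patterns false false

-- ===== PORT B =====
-- neg = sum(1 for p in patterns if p.startswith("!")) ported as countP; flags are comparisons
def get_pattern_types_py_alt (patterns : List String) : Bool × Bool :=
  let neg := patterns.countP (fun p => PySem.Str.startswith p "!")
  (decide (neg < patterns.length), decide (0 < neg))

-- ===== PRECONDITION & SPEC =====
def Spec_get_pattern_types_py (patterns : List String) (out : Bool × Bool) : Prop := out = get_pattern_types_py_alt patterns
instance (patterns : List String) (out : Bool × Bool) : Decidable (Spec_get_pattern_types_py patterns out) := by unfold Spec_get_pattern_types_py; infer_instance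

-- ===== CLAIM (what is proved, stated in full; the proofs are below) =====
def Claim_equal_get_pattern_types_py : Prop := ∀ (patterns : List String), Dom_get_pattern_types_py patterns → Spec_get_pattern_types_py patterns (get_pattern_types_py patterns)

-- ===== LEMMAS AND PROOFS =====
-- loop invariant: A's loop computes the OR of the accumulators with the two existence scans;
-- the early break is sound because once both flags are true the result is fixed.
theorem loop_eq (ps : List String) (ap an : Bool) :
    getPatternTypesLoop ps ap an =
      (ap || ps.any (fun p => !PySem.Str.startswith p "!"),
       an || ps.any (fun p => PySem.Str.startswith p "!")) := by
  induction ps generalizing ap an with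
  | nil => simp [getPatternTypesLoop]
  | cons p rest ih =>
    simp only [getPatternTypesLoop, List.any_cons]
    cases h : PySem.Str.startswith p "!" <;>
      cases ap <;> cases an <;> simp only [h, ih] <;> simp

-- the counting reduction agrees with the existence scans
theorem count_pos_iff (ps : List String) :
    ps.any (fun p => PySem.Str.startswith p "!") =
      decide (0 < ps.countP (fun p => PySem.Str.startswith p "!")) := by
  rw [Bool.eq_iff_iff]
  simp only [List.any_eq_true, decide_eq_true_eq, List.countP_pos_iff]

theorem count_lt_iff (ps : List String) :
    ps.any (fun p => !PySem.Str.startswith p "!") =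
      decide (ps.countP (fun p => PySem.Str.startswith p "!") < ps.length) := by
  rw [Bool.eq_iff_iff]
  simp only [List.any_eq_true, decide_eq_true_eq, List.countP_lt_length_iff,
    Bool.not_eq_true', Bool.not_eq_true]

-- ===== VERDICT (by name: the statement is the Claim_ definition above) =====
theorem get_pattern_types_py_spec : Claim_equal_get_pattern_types_py := by
  intro patterns _
  show getPatternTypesLoop patterns false false = _
  rw [loop_eq, Bool.false_or, Bool.false_or, count_lt_iff, count_pos_iff]
  rfl
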